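-- pv_equiv track=rewrite | github.com/RaghuRam-Vellanki/jobagent | backend/agents/naukri_agent.py | _lookup_value
-- ===== SOURCE A (Python) =====
-- def _lookup_value(hint: str, profile_map: dict) -> str:
--     if not hint:
--         return ""
--     h = hint.lower()
--     # Longest-key-first so "expected ctc" beats "ctc"
--     for key in sorted(profile_map.keys(), key=len, reverse=True):
--         if key in h and profile_map[key]:
--             return str(profile_map[key])
--     return ""
-- ===== SOURCE B (Python) =====
-- def _lookup_value(hint: str, profile_map: dict) -> str:
--     if not hint:
--         return ""
--     h = hint.lower()
--     best_value = None
--     best_len = -1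
--     for key, value in profile_map.items():
--         if key in h and value and len(key) > best_len:
--             best_value = value
--             best_len = len(key)
--     return str(best_value) if best_value is not None else ""
-- ===== Notes on version B (the rewrite author's own statement) =====
-- stated objective: simpler
-- what changed: Replaced sort-keys-then-scan-for-first-match by a single pass over the dict items that keeps the longest matching key seen so far (strict '>' preserves the stable-sort insertion-order tie-break).
import Mathlib
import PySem

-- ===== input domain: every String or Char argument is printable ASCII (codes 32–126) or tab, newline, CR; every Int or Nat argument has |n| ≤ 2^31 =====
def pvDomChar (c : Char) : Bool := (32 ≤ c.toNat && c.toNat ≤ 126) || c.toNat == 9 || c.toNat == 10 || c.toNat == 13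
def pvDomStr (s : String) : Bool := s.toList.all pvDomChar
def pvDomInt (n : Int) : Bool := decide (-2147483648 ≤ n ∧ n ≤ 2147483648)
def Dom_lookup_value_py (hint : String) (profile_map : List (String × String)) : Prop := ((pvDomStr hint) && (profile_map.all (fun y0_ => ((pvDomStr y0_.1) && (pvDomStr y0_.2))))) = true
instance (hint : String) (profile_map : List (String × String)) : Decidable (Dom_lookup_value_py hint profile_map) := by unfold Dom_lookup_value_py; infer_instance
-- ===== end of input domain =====

-- B replaces A's sort-keys-then-return-first-match by a single pass keeping the longest matching key
-- (strict '>' preserves the stable sort's insertion-order tie-break); equal return values, simpler structure.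

-- ===== PORT A =====
-- the for-loop with its early return, over the sorted key list
def pvALoop (d : PySem.Dict String String) (h : String) : List String → String
  | [] => ""
  | k :: ks =>
      if PySem.Str.isIn k h && decide (PySem.Dict.getD d k "" ≠ "") then PySem.Dict.getD d k ""
      else pvALoop d h ks

def lookup_value_py (hint : String) (profile_map : List (String × String)) : String :=
  if hint = "" then ""
  else
    let h := PySem.Str.lower hint
    let d := PySem.Dict.ofList profile_map
    pvALoop d h (PySem.List.sorted d.keys (fun k => PySem.Str.len k) true)

-- ===== PORT B =====
def lookup_value_py_alt (hint : String) (profile_map : List (String × String)) : String :=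
  if hint = "" then ""
  else
    let h := PySem.Str.lower hint
    let d := PySem.Dict.ofList profile_map
    let st := d.items.foldl
      (fun acc kv =>
        if PySem.Str.isIn kv.1 h && decide (kv.2 ≠ "") && decide (PySem.Str.len kv.1 > acc.2) then
          (some kv.2, PySem.Str.len kv.1)
        else acc)
      ((none : Option String), (-1 : Int))
    match st.1 with
    | some v => v
    | none => ""

-- ===== PRECONDITION & SPEC =====
def Spec_lookup_value_py (hint : String) (profile_map : List (String × String)) (out : String) : Prop := out = lookup_value_py_alt hint profile_map
instance (hint : String) (profile_map : List (String × String)) (out : String) : Decidable (Spec_lookup_value_py hint profile_map out) := by unfold Spec_lookup_value_py; infer_instance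

-- ===== CLAIM (what is proved, stated in full; the proofs are below) =====
def Claim_equal_lookup_value_py : Prop := ∀ (hint : String) (profile_map : List (String × String)), Dom_lookup_value_py hint profile_map → Spec_lookup_value_py hint profile_map (lookup_value_py hint profile_map)

-- ===== LEMMAS AND PROOFS =====

-- the "keep the best so far" step, abstractly (stores the winning element itself)
def pvBestStep {α : Type} (key : α → Int) (P : α → Bool) (acc : Option α) (x : α) : Option α :=
  if P x && (match acc with | none => true | some a => decide (key a < key x)) then some x else acc

theorem pvInsertBy_split {α : Type} (bef : α → α → Bool) (x : α) (s : List α) :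
    PySem.List.insertBy bef x s
      = s.takeWhile (fun y => !bef x y) ++ x :: s.dropWhile (fun y => !bef x y) := by
  induction s with
  | nil => simp [PySem.List.insertBy]
  | cons y ys ih =>
    by_cases hb : bef x y = true
    · simp [PySem.List.insertBy, hb]
    · simp only [Bool.not_eq_true] at hb
      simp [PySem.List.insertBy, hb, ih]

theorem pvSorted_concat {α : Type} (key : α → Int) (ys : List α) (x : α) :
    PySem.List.sorted (ys ++ [x]) key true
      = PySem.List.insertBy (fun a b => decide (key b < key a)) x (PySem.List.sorted ys key true) := by
  rw [PySem.List.sorted_rev_eq_foldl_insertBy, PySem.List.sorted_rev_eq_foldl_insertBy,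
    List.foldl_append]
  simp

-- inserting x into a descending-by-key list commutes with "first match" the way the best-step does
theorem pvStep_find {α : Type} (key : α → Int) (P : α → Bool) (s : List α)
    (hs : s.Pairwise (fun a b => key b ≤ key a)) (x : α) :
    List.find? P (PySem.List.insertBy (fun a b => decide (key b < key a)) x s)
      = pvBestStep key P (List.find? P s) x := by
  rw [pvInsertBy_split, List.find?_append]
  by_cases hPx : P x = true
  · cases hfs : List.find? P s with
    | none =>
      have hall : ∀ z ∈ s, ¬ P z = true := List.find?_eq_none.mp hfs
      have ht1 : List.find? P (s.takeWhile (fun y => !decide (key y < key x))) = none := by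
        rw [List.find?_eq_none]
        intro z hz
        exact hall z (List.takeWhile_subset _ hz)
      rw [ht1]
      simp [pvBestStep, hPx]
    | some m =>
      obtain ⟨hPm, as, bs, hsplit, hasnone⟩ := List.find?_eq_some_iff_append.mp hfs
      have hmax : ∀ z ∈ s, P z = true → key z ≤ key m := by
        intro z hz hPz
        rw [hsplit] at hz hs
        rcases List.mem_append.mp hz with hza | hzb
        · exact absurd hPz (by simpa using hasnone z hza)
        · rcases List.mem_cons.mp hzb with rfl | hzb'
          · exact le_refl _
          · have := (List.pairwise_append.mp hs).2.1
            exact (List.pairwise_cons.mp this).1 z hzb'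
      by_cases hlt : key m < key x
      · have ht1 : List.find? P (s.takeWhile (fun y => !decide (key y < key x))) = none := by
          rw [List.find?_eq_none]
          intro z hz hPz
          have hz1 : z ∈ s := List.takeWhile_subset _ hz
          have hz2 := List.mem_takeWhile_imp hz
          have : key z ≤ key m := hmax z hz1 hPz
          simp only [Bool.not_eq_eq_eq_not, Bool.not_true, decide_eq_false_iff_not, not_lt] at hz2
          omega
        rw [ht1]
        simp [pvBestStep, hPx, hlt]
      · -- key x ≤ key m : the old first match survives
        have hxm : key x ≤ key m := le_of_not_gt hlt
        have hasge : ∀ a ∈ as, key m ≤ key a := by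
          intro a ha
          rw [hsplit] at hs
          exact (List.pairwise_append.mp hs).2.2 a ha m (List.mem_cons_self ..)
        have htw : (s.takeWhile (fun y => !decide (key y < key x)))
            = as ++ m :: (bs.takeWhile (fun y => !decide (key y < key x))) := by
          rw [hsplit, List.takeWhile_append]
          have has : List.takeWhile (fun y => !decide (key y < key x)) as = as := by
            rw [List.takeWhile_eq_self_iff]
            intro a ha
            have := hasge a ha
            simp only [Bool.not_eq_eq_eq_not, Bool.not_true, decide_eq_false_iff_not, not_lt]
            omega
          rw [has, if_pos rfl]
          have hm : (!decide (key m < key x)) = true := by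
            simp only [Bool.not_eq_eq_eq_not, Bool.not_true, decide_eq_false_iff_not, not_lt]
            omega
          simp [hm]
        rw [htw, List.find?_append]
        have hasfind : List.find? P as = none := by
          rw [List.find?_eq_none]
          intro a ha
          simpa using hasnone a ha
        rw [hasfind, List.find?_cons]
        simp [pvBestStep, hPx, hPm, hlt]
  · -- x does not match: it is invisible to find? and to the best-step
    have hx : P x = false := by simpa using hPx
    have : List.find? P (x :: s.dropWhile (fun y => !decide (key y < key x)))
        = List.find? P (s.dropWhile (fun y => !decide (key y < key x))) := by
      rw [List.find?_cons, hx]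
    rw [this, ← List.find?_append, List.takeWhile_append_dropWhile]
    simp [pvBestStep, hx]

-- the core: first match of the stable longest-first sort = left fold keeping the strictly longer match
theorem pvCore {α : Type} (key : α → Int) (P : α → Bool) (xs : List α) :
    List.find? P (PySem.List.sorted xs key true) = xs.foldl (pvBestStep key P) none := by
  induction xs using List.reverseRecOn with
  | nil => simp [PySem.List.sorted]
  | append_singleton ys x ih =>
    rw [pvSorted_concat, List.foldl_append, List.foldl_cons, List.foldl_nil, ← ih]
    exact pvStep_find key P _ (PySem.List.sorted_pairwise_rev ys key) x

-- A's loop is "first match, then look the value up"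
theorem pvALoop_eq_find? (d : PySem.Dict String String) (h : String) (ks : List String) :
    pvALoop d h ks
      = match List.find? (fun k => PySem.Str.isIn k h && decide (PySem.Dict.getD d k "" ≠ "")) ks with
        | some k => PySem.Dict.getD d k ""
        | none => "" := by
  induction ks with
  | nil => simp [pvALoop]
  | cons k ks ih =>
    by_cases h1 : PySem.Chars.isIn k.toList h.toList = true
    · by_cases h2 : PySem.Dict.getD d k "" = ""
      · simp [pvALoop, h1, h2, ih]
      · simp [pvALoop, h1, h2]
    · simp [pvALoop, h1, ih]

-- B's concrete fold over (key, value) pairs is the abstract best-fold over the keys, up to this view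
def pvPhi (d : PySem.Dict String String) : Option String → Option String × Int
  | none => (none, -1)
  | some k => (some (PySem.Dict.getD d k ""), PySem.Str.len k)

theorem pvFoldB (d : PySem.Dict String String) (h : String) (ks : List String) :
    ∀ acc : Option String,
      List.foldl
        (fun acc kv =>
          if PySem.Str.isIn kv.1 h && decide (kv.2 ≠ "") && decide (PySem.Str.len kv.1 > acc.2) then
            (some kv.2, PySem.Str.len kv.1)
          else acc)
        (pvPhi d acc)
        (ks.map (fun k => (k, PySem.Dict.getD d k "")))
      = pvPhi d (ks.foldl
          (pvBestStep (fun k => PySem.Str.len k)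
            (fun k => PySem.Str.isIn k h && decide (PySem.Dict.getD d k "" ≠ ""))) acc) := by
  induction ks with
  | nil => intro acc; simp
  | cons k ks ih =>
    intro acc
    rw [List.map_cons, List.foldl_cons, List.foldl_cons]
    have hstep :
        (if PySem.Str.isIn k h && decide (PySem.Dict.getD d k "" ≠ "")
              && decide (PySem.Str.len k > (pvPhi d acc).2) then
          (some (PySem.Dict.getD d k ""), PySem.Str.len k)
        else pvPhi d acc)
        = pvPhi d (pvBestStep (fun k => PySem.Str.len k)
            (fun k => PySem.Str.isIn k h && decide (PySem.Dict.getD d k "" ≠ "")) acc k) := by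
      cases acc with
      | none =>
        by_cases h1 : PySem.Chars.isIn k.toList h.toList = true
        · by_cases h2 : PySem.Dict.getD d k "" = ""
          · simp [pvPhi, pvBestStep, h1, h2]
          · simp [pvPhi, pvBestStep, h1, h2, PySem.Str.len_eq]
            omega
        · simp [pvPhi, pvBestStep, h1]
      | some a =>
        by_cases h1 : PySem.Chars.isIn k.toList h.toList = true
        · by_cases h2 : PySem.Dict.getD d k "" = ""
          · simp [pvPhi, pvBestStep, h1, h2]
          · by_cases h3 : a.length < k.length
            · simp [pvPhi, pvBestStep, h1, h2, h3, PySem.Str.len_eq]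
            · simp [pvPhi, pvBestStep, h1, h2, h3, PySem.Str.len_eq]
        · simp [pvPhi, pvBestStep, h1]
    rw [hstep, ih]

-- ===== VERDICT (by name: the statement is the Claim_ definition above) =====
theorem lookup_value_py_spec : Claim_equal_lookup_value_py := by
  intro hint pm _hdom
  unfold Spec_lookup_value_py lookup_value_py lookup_value_py_alt
  by_cases hh : hint = ""
  · simp [hh]
  · simp only [hh, ite_false]
    set h := PySem.Str.lower hint with hhdef
    set d := PySem.Dict.ofList pm with hddef
    have hitems : d.items = d.keys.map (fun k => (k, PySem.Dict.getD d k "")) :=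
      PySem.Dict.items_eq_map_keys d (PySem.Dict.nodup_keys_ofList pm) ""
    rw [pvALoop_eq_find?, pvCore (fun k => PySem.Str.len k)
      (fun k => PySem.Str.isIn k h && decide (PySem.Dict.getD d k "" ≠ "")) d.keys]
    rw [hitems]
    have := pvFoldB d h d.keys none
    simp only [pvPhi] at this
    rw [this]
    cases d.keys.foldl
        (pvBestStep (fun k => PySem.Str.len k)
          (fun k => PySem.Str.isIn k h && decide (PySem.Dict.getD d k "" ≠ ""))) none with
    | none => simp
    | some k => simp
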